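-- pv_equiv track=rewrite | github.com/RVeh/Hypothesentests | tests/utils/format_K.py | format_rejection_region_intervals
-- ===== SOURCE A (Python) =====
-- from typing import Iterable
--
-- def format_rejection_region_intervals(K: Iterable[int], n: int) -> str:
--     """
--     Formatiert K ⊂ {0,...,n} in Rand-Intervall-Schreibweise.
--
--     Fälle:
--     - beide Ränder:  K = {0,...,l} ∪ {r,...,n}
--     - nur links:     K = {0,...,l}
--     - nur rechts:    K = {r,...,n}
--     - leer:          K = ∅
--     """
--     Kset = set(K)
--     if not Kset:
--         return r"$K=\emptyset$"
--
--     # Linker Rand: muss bei 0 beginnen, sonst gibt es keinen linken Tail.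
--     l = None
--     if 0 in Kset:
--         l = 0
--         while (l + 1) in Kset:
--             l += 1
--
--     # Rechter Rand: muss bei n beginnen, sonst gibt es keinen rechten Tail.
--     r = None
--     if n in Kset:
--         r = n
--         while (r - 1) in Kset:
--             r -= 1
--
--     if l is not None and r is not None:
--         return rf"$K=\{{0,\dots,{l}\}}\cup\{{{r},\dots,{n}\}}$"
--     if l is not None:
--         return rf"$K=\{{0,\dots,{l}\}}$"
--     if r is not None:
--         return rf"$K=\{{{r},\dots,{n}\}}$"
--
--     # Wenn weder 0 noch n in K sind, ist es kein Randbereich (hier selten).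
--     # Dann lieber kompakt als Liste: min..max als Hinweis.
--     return rf"$K\subseteq\{{0,\dots,{n}\}},\;\min(K)={min(Kset)},\;\max(K)={max(Kset)}$"
-- ===== SOURCE B (Python) =====
-- from typing import Iterable
--
-- def format_rejection_region_intervals(K: Iterable[int], n: int) -> str:
--     # B: compress sorted(set(K)) into the list of maximal runs of consecutive
--     # integers, then answer every question by querying that interval list.
--     vals = sorted(set(K))
--     if not vals:
--         return r"$K=\emptyset$"
--     intervals = []
--     lo = hi = vals[0]
--     for v in vals[1:]:
--         if v == hi + 1:
--             hi = v
--         else: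
--             intervals.append((lo, hi))
--             lo = hi = v
--     intervals.append((lo, hi))
--     l = next((b for (a, b) in intervals if a <= 0 <= b), None)
--     r = next((a for (a, b) in intervals if a <= n <= b), None)
--     if l is not None and r is not None:
--         return rf"$K=\{{0,\dots,{l}\}}\cup\{{{r},\dots,{n}\}}$"
--     if l is not None:
--         return rf"$K=\{{0,\dots,{l}\}}$"
--     if r is not None:
--         return rf"$K=\{{{r},\dots,{n}\}}$"
--     return rf"$K\subseteq\{{0,\dots,{n}\}},\;\min(K)={intervals[0][0]},\;\max(K)={intervals[-1][1]}$"
-- ===== Notes on version B (the rewrite author's own statement) =====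
-- stated objective: alternative
-- what changed: B compresses sorted(set(K)) into an explicit list of maximal consecutive-run intervals in one pass and then answers by querying that interval list (the run containing 0, the run containing n, and first/last interval for min/max), instead of A's repeated set-membership walks from 0 and n.
import Mathlib
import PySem

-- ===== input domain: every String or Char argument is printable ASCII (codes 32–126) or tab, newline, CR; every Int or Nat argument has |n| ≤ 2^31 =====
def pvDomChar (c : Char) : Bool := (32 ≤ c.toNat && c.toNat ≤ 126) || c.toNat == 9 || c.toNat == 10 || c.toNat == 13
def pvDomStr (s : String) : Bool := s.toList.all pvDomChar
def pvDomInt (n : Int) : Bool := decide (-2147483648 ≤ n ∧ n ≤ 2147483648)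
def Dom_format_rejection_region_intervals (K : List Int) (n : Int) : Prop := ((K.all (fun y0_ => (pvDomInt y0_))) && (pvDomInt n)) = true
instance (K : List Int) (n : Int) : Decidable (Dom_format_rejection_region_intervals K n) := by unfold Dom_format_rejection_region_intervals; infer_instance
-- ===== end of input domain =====

-- B compresses sorted(set(K)) into the list of maximal consecutive-run intervals
-- and answers by querying that list, instead of A's membership walks from 0 and n;
-- objective: alternative.

-- ===== PORT A =====
-- A's 'while (l + 1) in Kset: l += 1'; fuel = |Kset| iterations always suffice
-- (proved below), so this is the same loop.
def pvClimbUp (s : List Int) : Nat → Int → Int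
  | 0, l => l
  | f + 1, l => if (l + 1) ∈ s then pvClimbUp s f (l + 1) else l

-- A's 'while (r - 1) in Kset: r -= 1'
def pvClimbDown (s : List Int) : Nat → Int → Int
  | 0, r => r
  | f + 1, r => if (r - 1) ∈ s then pvClimbDown s f (r - 1) else r

def format_rejection_region_intervals (K : List Int) (n : Int) : String :=
  let Kset : PySem.Set Int := PySem.Set.ofList K
  if Kset = [] then "$K=\\emptyset$"
  else
    let l? : Option Int := if (0 : Int) ∈ Kset then some (pvClimbUp Kset Kset.length 0) else none
    let r? : Option Int := if n ∈ Kset then some (pvClimbDown Kset Kset.length n) else none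
    match l?, r? with
    | some l, some r =>
        "$K=\\{0,\\dots," ++ PySem.Int.toStr l ++ "\\}\\cup\\{" ++ PySem.Int.toStr r
          ++ ",\\dots," ++ PySem.Int.toStr n ++ "\\}$"
    | some l, none => "$K=\\{0,\\dots," ++ PySem.Int.toStr l ++ "\\}$"
    | none, some r => "$K=\\{" ++ PySem.Int.toStr r ++ ",\\dots," ++ PySem.Int.toStr n ++ "\\}$"
    | none, none =>
        match PySem.List.min? Kset (fun x => x), PySem.List.max? Kset (fun x => x) with
        | some mn, some mx =>
            "$K\\subseteq\\{0,\\dots," ++ PySem.Int.toStr n ++ "\\},\\;\\min(K)="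
              ++ PySem.Int.toStr mn ++ ",\\;\\max(K)=" ++ PySem.Int.toStr mx ++ "$"
        | _, _ => ""  -- unreachable: Kset ≠ [] in this branch

-- ===== PORT B =====
-- Source B's merge loop over vals[1:] with accumulator (intervals, lo, hi),
-- written as structural recursion on the remaining values.
def pvMerge : Int → Int → List Int → List (Int × Int)
  | lo, hi, [] => [(lo, hi)]
  | lo, hi, v :: t => if v = hi + 1 then pvMerge lo v t else (lo, hi) :: pvMerge v v t

def pvAltCore (h : Int) (rest : List Int) (n : Int) : String :=
  let ivs := pvMerge h h rest
  let l? : Option Int := (ivs.find? (fun p => decide (p.1 ≤ 0 ∧ 0 ≤ p.2))).map (·.2)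
  let r? : Option Int := (ivs.find? (fun p => decide (p.1 ≤ n ∧ n ≤ p.2))).map (·.1)
  match l?, r? with
  | some l, some r =>
      "$K=\\{0,\\dots," ++ PySem.Int.toStr l ++ "\\}\\cup\\{" ++ PySem.Int.toStr r
        ++ ",\\dots," ++ PySem.Int.toStr n ++ "\\}$"
  | some l, none => "$K=\\{0,\\dots," ++ PySem.Int.toStr l ++ "\\}$"
  | none, some r => "$K=\\{" ++ PySem.Int.toStr r ++ ",\\dots," ++ PySem.Int.toStr n ++ "\\}$"
  | none, none =>
      "$K\\subseteq\\{0,\\dots," ++ PySem.Int.toStr n ++ "\\},\\;\\min(K)="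
        ++ PySem.Int.toStr (ivs.headD (h, h)).1 ++ ",\\;\\max(K)="
        ++ PySem.Int.toStr (ivs.getLastD (h, h)).2 ++ "$"

def format_rejection_region_intervals_alt (K : List Int) (n : Int) : String :=
  match PySem.List.sorted (PySem.Set.ofList K) (fun x => x) false with
  | [] => "$K=\\emptyset$"
  | h :: rest => pvAltCore h rest n

-- ===== PRECONDITION & SPEC =====
def Spec_format_rejection_region_intervals (K : List Int) (n : Int) (out : String) : Prop := out = format_rejection_region_intervals_alt K n
instance (K : List Int) (n : Int) (out : String) : Decidable (Spec_format_rejection_region_intervals K n out) := by unfold Spec_format_rejection_region_intervals; infer_instance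

-- ===== CLAIM (what is proved, stated in full; the proofs are below) =====
def Claim_equal_format_rejection_region_intervals : Prop := ∀ (K : List Int) (n : Int), Dom_format_rejection_region_intervals K n → Spec_format_rejection_region_intervals K n (format_rejection_region_intervals K n)

-- ===== LEMMAS AND PROOFS =====

-- a nodup list included in another list is no longer than it
theorem pvNodupLen (l₁ l₂ : List Int) (h : l₁.Nodup) (hs : l₁ ⊆ l₂) : l₁.length ≤ l₂.length := by
  have h1 : l₁.toFinset.card ≤ l₂.toFinset.card := Finset.card_le_card (by
    intro a ha; simp only [List.mem_toFinset] at *; exact hs ha)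
  have h2 : l₁.toFinset.card = l₁.length := List.toFinset_card_of_nodup h
  have h3 : l₂.toFinset.card ≤ l₂.length := l₂.toFinset_card_le
  omega

-- |s|+1 consecutive integers cannot all lie in a nodup list s
theorem pvTooMany (s : List Int) (a : Int)
    (h : ∀ k : Int, a ≤ k → k ≤ a + (s.length : Int) → k ∈ s) : False := by
  have hsub : ((List.range (s.length + 1)).map (fun j : Nat => a + (j : Int))) ⊆ s := by
    intro x hx
    simp only [List.mem_map, List.mem_range] at hx
    obtain ⟨j, hj, rfl⟩ := hx
    exact h _ (by show a ≤ a + (j : Int); omega) (by show a + (j : Int) ≤ a + (s.length : Int); omega)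
  have hnd' : ((List.range (s.length + 1)).map (fun j : Nat => a + (j : Int))).Nodup :=
    List.Nodup.map (f := fun j : Nat => a + (j : Int)) (fun p q hpq => by simpa using hpq) List.nodup_range
  have := pvNodupLen _ _ hnd' hsub
  simp at this

theorem pvClimbUp_spec (s : List Int) (f : Nat) (l : Int) :
    l ≤ pvClimbUp s f l ∧ (∀ k, l < k → k ≤ pvClimbUp s f l → k ∈ s) ∧
      ((pvClimbUp s f l + 1) ∉ s ∨ pvClimbUp s f l = l + f) := by
  induction f generalizing l with
  | zero =>
    simp only [pvClimbUp]
    refine ⟨le_refl l, ?_, Or.inr (by omega)⟩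
    intro k h1 h2; exact absurd (lt_of_lt_of_le h1 h2) (lt_irrefl l)
  | succ f ih =>
    by_cases hm : (l + 1) ∈ s
    · simp only [pvClimbUp, if_pos hm]
      obtain ⟨h1, h2, h3⟩ := ih (l + 1)
      refine ⟨by omega, ?_, ?_⟩
      · intro k hk1 hk2
        by_cases hk : k ≤ l + 1
        · have hkl : k = l + 1 := by omega
          exact hkl ▸ hm
        · exact h2 k (by omega) hk2
      · rcases h3 with h | h
        · exact Or.inl h
        · exact Or.inr (by omega)
    · simp only [pvClimbUp, if_neg hm]
      exact ⟨le_refl l, by intro k hk1 hk2; omega, Or.inl hm⟩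

theorem pvClimbUp_full (s : List Int) (h0 : (0 : Int) ∈ s) :
    0 ≤ pvClimbUp s s.length 0 ∧ (∀ k, 0 ≤ k → k ≤ pvClimbUp s s.length 0 → k ∈ s) ∧
      (pvClimbUp s s.length 0 + 1) ∉ s := by
  obtain ⟨h1, h2, h3⟩ := pvClimbUp_spec s s.length 0
  have hmem : ∀ k, 0 ≤ k → k ≤ pvClimbUp s s.length 0 → k ∈ s := by
    intro k hk1 hk2
    rcases eq_or_lt_of_le hk1 with h | h
    · exact h ▸ h0
    · exact h2 k h hk2
  refine ⟨h1, hmem, ?_⟩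
  rcases h3 with h | h
  · exact h
  · exact absurd (pvTooMany s 0 (fun k hk1 hk2 => hmem k hk1 (by omega))) (fun x => x)

theorem pvClimbDown_spec (s : List Int) (f : Nat) (r : Int) :
    pvClimbDown s f r ≤ r ∧ (∀ k, pvClimbDown s f r ≤ k → k < r → k ∈ s) ∧
      ((pvClimbDown s f r - 1) ∉ s ∨ pvClimbDown s f r = r - f) := by
  induction f generalizing r with
  | zero =>
    simp only [pvClimbDown]
    refine ⟨le_refl r, ?_, Or.inr (by omega)⟩
    intro k h1 h2; exact absurd (lt_of_le_of_lt h1 h2) (lt_irrefl r)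
  | succ f ih =>
    by_cases hm : (r - 1) ∈ s
    · simp only [pvClimbDown, if_pos hm]
      obtain ⟨h1, h2, h3⟩ := ih (r - 1)
      refine ⟨by omega, ?_, ?_⟩
      · intro k hk1 hk2
        by_cases hk : r - 1 ≤ k
        · have hkl : k = r - 1 := by omega
          exact hkl ▸ hm
        · exact h2 k hk1 (by omega)
      · rcases h3 with h | h
        · exact Or.inl h
        · exact Or.inr (by omega)
    · simp only [pvClimbDown, if_neg hm]
      exact ⟨le_refl r, by intro k hk1 hk2; omega, Or.inl hm⟩

theorem pvClimbDown_full (s : List Int) (n : Int) (hn : n ∈ s) :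
    pvClimbDown s s.length n ≤ n ∧ (∀ k, pvClimbDown s s.length n ≤ k → k ≤ n → k ∈ s) ∧
      (pvClimbDown s s.length n - 1) ∉ s := by
  obtain ⟨h1, h2, h3⟩ := pvClimbDown_spec s s.length n
  have hmem : ∀ k, pvClimbDown s s.length n ≤ k → k ≤ n → k ∈ s := by
    intro k hk1 hk2
    rcases eq_or_lt_of_le hk2 with h | h
    · exact h ▸ hn
    · exact h2 k hk1 h
  refine ⟨h1, hmem, ?_⟩
  rcases h3 with h | h
  · exact h
  · exact absurd (pvTooMany s (pvClimbDown s s.length n)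
      (fun k hk1 hk2 => hmem k hk1 (by omega))) (fun x => x)

-- the maximal run containing 0 is unique
theorem pvLeftUnique (s : List Int) (a b : Int)
    (ha1 : 0 ≤ a) (ha2 : ∀ k, 0 ≤ k → k ≤ a → k ∈ s) (ha3 : (a + 1) ∉ s)
    (hb1 : 0 ≤ b) (hb2 : ∀ k, 0 ≤ k → k ≤ b → k ∈ s) (hb3 : (b + 1) ∉ s) : a = b := by
  by_contra hne
  rcases lt_or_gt_of_ne hne with h | h
  · exact ha3 (hb2 (a + 1) (by omega) (by omega))
  · exact hb3 (ha2 (b + 1) (by omega) (by omega))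

-- the maximal run containing n is unique
theorem pvRightUnique (s : List Int) (n a b : Int)
    (ha1 : a ≤ n) (ha2 : ∀ k, a ≤ k → k ≤ n → k ∈ s) (ha3 : (a - 1) ∉ s)
    (hb1 : b ≤ n) (hb2 : ∀ k, b ≤ k → k ≤ n → k ∈ s) (hb3 : (b - 1) ∉ s) : a = b := by
  by_contra hne
  rcases lt_or_gt_of_ne hne with h | h
  · exact hb3 (ha2 (b - 1) (by omega) (by omega))
  · exact ha3 (hb2 (a - 1) (by omega) (by omega))

-- pvMerge on the suffix above hi produces exactly the maximal runs of L that
-- start at or above lo: every emitted interval is a maximal run of L, and every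
-- element of L at or above lo lies in some emitted interval.
theorem pvMerge_spec (L : List Int) (vs : List Int) (lo hi : Int)
    (hlohi : lo ≤ hi)
    (hrun : ∀ k, lo ≤ k → k ≤ hi → k ∈ L)
    (hlo : (lo - 1) ∉ L)
    (hvs_pw : vs.Pairwise (· < ·))
    (hvs_gt : ∀ z ∈ vs, hi < z)
    (hvs_sub : ∀ z ∈ vs, z ∈ L)
    (hcover : ∀ x ∈ L, hi < x → x ∈ vs) :
    (∀ p ∈ pvMerge lo hi vs, p.1 ≤ p.2 ∧ (∀ k, p.1 ≤ k → k ≤ p.2 → k ∈ L) ∧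
        (p.1 - 1) ∉ L ∧ (p.2 + 1) ∉ L) ∧
      (∀ x ∈ L, lo ≤ x → ∃ p ∈ pvMerge lo hi vs, p.1 ≤ x ∧ x ≤ p.2) := by
  induction vs generalizing lo hi with
  | nil =>
    simp only [pvMerge]
    constructor
    · intro p hp
      rcases List.mem_singleton.mp hp with rfl
      refine ⟨hlohi, hrun, hlo, ?_⟩
      intro hc
      exact List.not_mem_nil (hcover _ hc (by omega))
    · intro x hx hlx
      refine ⟨(lo, hi), List.mem_singleton.mpr rfl, hlx, ?_⟩
      by_contra hgt
      exact List.not_mem_nil (hcover x hx (by omega))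
  | cons v t ih =>
    have hpt : t.Pairwise (· < ·) := hvs_pw.of_cons
    have hvt : ∀ z ∈ t, v < z := fun z hz => List.rel_of_pairwise_cons hvs_pw hz
    by_cases hv : v = hi + 1
    · simp only [pvMerge, if_pos hv]
      apply ih lo v (by omega)
      · intro k hk1 hk2
        by_cases hk : k ≤ hi
        · exact hrun k hk1 hk
        · have : k = v := by omega
          exact this ▸ hvs_sub v List.mem_cons_self
      · exact hlo
      · exact hpt
      · exact hvt
      · exact fun z hz => hvs_sub z (List.mem_cons_of_mem _ hz)
      · intro x hx hvx
        have := hcover x hx (by omega)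
        rcases List.mem_cons.mp this with h | h
        · omega
        · exact h
    · have hvhi : hi + 1 < v := by
        have := hvs_gt v List.mem_cons_self; omega
      have hhi1 : (hi + 1) ∉ L := by
        intro hc
        have := hcover _ hc (by omega)
        rcases List.mem_cons.mp this with h | h
        · omega
        · have := hvs_gt _ (List.mem_cons_of_mem _ h)
          have := hvt _ h; omega
      have hrec := ih v v (le_refl v)
        (by intro k hk1 hk2
            have : k = v := by omega
            exact this ▸ hvs_sub v List.mem_cons_self)
        (by intro hc
            have := hcover _ hc (by omega)
            rcases List.mem_cons.mp this with h | h
            · omega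
            · have := hvt _ h; omega)
        hpt hvt
        (fun z hz => hvs_sub z (List.mem_cons_of_mem _ hz))
        (by intro x hx hvx
            have := hcover x hx (by omega)
            rcases List.mem_cons.mp this with h | h
            · omega
            · exact h)
      obtain ⟨hr1, hr2⟩ := hrec
      simp only [pvMerge, if_neg hv]
      constructor
      · intro p hp
        rcases List.mem_cons.mp hp with rfl | hp'
        · exact ⟨hlohi, hrun, hlo, hhi1⟩
        · exact hr1 p hp'
      · intro x hx hlx
        by_cases hxhi : x ≤ hi
        · exact ⟨(lo, hi), List.mem_cons_self, hlx, hxhi⟩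
        · have hxv : v ≤ x := by
            have := hcover x hx (by omega)
            rcases List.mem_cons.mp this with h | h
            · omega
            · have := hvt _ h; omega
          obtain ⟨p, hp, hpx⟩ := hr2 x hx hxv
          exact ⟨p, List.mem_cons_of_mem _ hp, hpx⟩

theorem pvMerge_head_fst (lo hi : Int) (vs : List Int) (d : Int × Int) :
    ((pvMerge lo hi vs).headD d).1 = lo := by
  induction vs generalizing lo hi with
  | nil => simp [pvMerge]
  | cons v t ih =>
    simp only [pvMerge]
    split
    · exact ih lo v
    · simp

theorem pvMerge_getLast_snd (lo hi : Int) (vs : List Int) (d : Int × Int) :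
    ((pvMerge lo hi vs).getLastD d).2 = vs.getLastD hi := by
  induction vs generalizing lo hi d with
  | nil => simp [pvMerge]
  | cons v t ih =>
    simp only [pvMerge]
    split
    · rw [ih lo v d]
      cases t with
      | nil => simp
      | cons b m => simp [List.getLast?_eq_some_getLast (List.cons_ne_nil b m)]
    · rw [List.getLastD_cons, ih v v (lo, hi)]
      cases t with
      | nil => simp
      | cons b m => simp [List.getLast?_eq_some_getLast (List.cons_ne_nil b m)]

-- in a strictly increasing nonempty list every element is at most the last
theorem pvLeGetLast : ∀ (l : List Int) (h : l ≠ []), l.Pairwise (· < ·) →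
    ∀ y ∈ l, y ≤ l.getLast h := by
  intro l
  induction l with
  | nil => intro h; exact absurd rfl h
  | cons a l ih =>
    intro h hpw y hy
    cases l with
    | nil => simp at hy; simp [hy]
    | cons b m =>
      rw [List.getLast_cons (List.cons_ne_nil b m)]
      rcases List.mem_cons.mp hy with h1 | h1
      · have := List.rel_of_pairwise_cons hpw (List.getLast_mem (List.cons_ne_nil b m))
        omega
      · exact ih (List.cons_ne_nil b m) hpw.of_cons y h1

theorem pvMain (K : List Int) (n : Int) :
    format_rejection_region_intervals K n = format_rejection_region_intervals_alt K n := by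
  simp only [format_rejection_region_intervals, format_rejection_region_intervals_alt]
  have hpw : (PySem.List.sorted (PySem.Set.ofList K) (fun x => x) false).Pairwise (· < ·) :=
    PySem.List.sorted_ofList_pairwise_lt K
  have hmemt : ∀ x : Int, x ∈ PySem.List.sorted (PySem.Set.ofList K) (fun x => x) false ↔
      x ∈ PySem.Set.ofList K := fun x => PySem.List.mem_sorted (PySem.Set.ofList K) _ false x
  cases htt : PySem.List.sorted (PySem.Set.ofList K) (fun x => x) false with
  | nil =>
    have hS : PySem.Set.ofList K = [] :=
      (PySem.List.sorted_eq_nil_iff (PySem.Set.ofList K) (fun x => x) false).mp htt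
    simp [hS]
  | cons h rest =>
    have hSne : ¬ (PySem.Set.ofList K = []) := by
      intro he
      rw [(PySem.List.sorted_eq_nil_iff (PySem.Set.ofList K) (fun x => x) false).mpr he] at htt
      exact List.cons_ne_nil h rest htt.symm
    rw [htt] at hpw hmemt
    rw [if_neg hSne]
    simp only [pvAltCore]
    -- the interval-list spec instantiated at the full call pvMerge h h rest
    have hhmin : ∀ y ∈ h :: rest, h ≤ y := by
      intro y hy
      rcases List.mem_cons.mp hy with rfl | hy'
      · exact le_refl y
      · exact le_of_lt (List.rel_of_pairwise_cons hpw hy')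
    have hspec := pvMerge_spec (h :: rest) rest h h (le_refl h)
      (by intro k hk1 hk2
          have : k = h := by omega
          exact this ▸ List.mem_cons_self)
      (by intro hc
          have := hhmin _ hc; omega)
      hpw.of_cons
      (fun z hz => List.rel_of_pairwise_cons hpw hz)
      (fun z hz => List.mem_cons_of_mem _ hz)
      (by intro x hx hgt
          rcases List.mem_cons.mp hx with rfl | hx'
          · omega
          · exact hx')
    obtain ⟨hP1, hP2⟩ := hspec
    have hLeft : (if (0 : Int) ∈ PySem.Set.ofList K then
          some (pvClimbUp (PySem.Set.ofList K) (PySem.Set.ofList K).length 0) else none)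
        = ((pvMerge h h rest).find? (fun p => decide (p.1 ≤ 0 ∧ 0 ≤ p.2))).map (·.2) := by
      by_cases h0 : (0 : Int) ∈ PySem.Set.ofList K
      · have h0t : (0 : Int) ∈ h :: rest := (hmemt 0).mpr h0
        have hsome : ((pvMerge h h rest).find? (fun p => decide (p.1 ≤ 0 ∧ 0 ≤ p.2))).isSome := by
          apply List.find?_isSome.mpr
          obtain ⟨p, hp, hp1, hp2⟩ := hP2 0 h0t (hhmin 0 h0t)
          exact ⟨p, hp, decide_eq_true ⟨hp1, hp2⟩⟩
        obtain ⟨q, hq⟩ := Option.isSome_iff_exists.mp hsome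
        have hqmem := List.mem_of_find?_eq_some hq
        have hqd : (fun p : Int × Int => decide (p.1 ≤ 0 ∧ 0 ≤ p.2)) q = true :=
          List.find?_some (p := fun p : Int × Int => decide (p.1 ≤ 0 ∧ 0 ≤ p.2)) hq
        have hqp : q.1 ≤ 0 ∧ 0 ≤ q.2 := of_decide_eq_true hqd
        obtain ⟨hq1, hq2, hq3, hq4⟩ := hP1 q hqmem
        obtain ⟨a1, a2, a3⟩ := pvClimbUp_full (PySem.Set.ofList K) h0
        have hl : pvClimbUp (PySem.Set.ofList K) (PySem.Set.ofList K).length 0 = q.2 :=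
          pvLeftUnique (PySem.Set.ofList K) _ _ a1 a2 a3 hqp.2
            (fun k hk1 hk2 => (hmemt k).mp (hq2 k (le_trans hqp.1 hk1) hk2))
            (fun hmem => hq4 ((hmemt _).mpr hmem))
        rw [if_pos h0, hq, hl]; rfl
      · have hnone : (pvMerge h h rest).find? (fun p => decide (p.1 ≤ 0 ∧ 0 ≤ p.2)) = none := by
          rw [List.find?_eq_none]
          intro p hp hpred
          have hpq : p.1 ≤ 0 ∧ 0 ≤ p.2 := of_decide_eq_true hpred
          obtain ⟨-, hq2, -, -⟩ := hP1 p hp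
          exact h0 ((hmemt 0).mp (hq2 0 hpq.1 hpq.2))
        rw [if_neg h0, hnone]; rfl
    have hRight : (if n ∈ PySem.Set.ofList K then
          some (pvClimbDown (PySem.Set.ofList K) (PySem.Set.ofList K).length n) else none)
        = ((pvMerge h h rest).find? (fun p => decide (p.1 ≤ n ∧ n ≤ p.2))).map (·.1) := by
      by_cases hn : n ∈ PySem.Set.ofList K
      · have hnt : n ∈ h :: rest := (hmemt n).mpr hn
        have hsome : ((pvMerge h h rest).find? (fun p => decide (p.1 ≤ n ∧ n ≤ p.2))).isSome := by
          apply List.find?_isSome.mpr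
          obtain ⟨p, hp, hp1, hp2⟩ := hP2 n hnt (hhmin n hnt)
          exact ⟨p, hp, decide_eq_true ⟨hp1, hp2⟩⟩
        obtain ⟨q, hq⟩ := Option.isSome_iff_exists.mp hsome
        have hqmem := List.mem_of_find?_eq_some hq
        have hqd : (fun p : Int × Int => decide (p.1 ≤ n ∧ n ≤ p.2)) q = true :=
          List.find?_some (p := fun p : Int × Int => decide (p.1 ≤ n ∧ n ≤ p.2)) hq
        have hqp : q.1 ≤ n ∧ n ≤ q.2 := of_decide_eq_true hqd
        obtain ⟨hq1, hq2, hq3, hq4⟩ := hP1 q hqmem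
        obtain ⟨a1, a2, a3⟩ := pvClimbDown_full (PySem.Set.ofList K) n hn
        have hr : pvClimbDown (PySem.Set.ofList K) (PySem.Set.ofList K).length n = q.1 :=
          pvRightUnique (PySem.Set.ofList K) n _ _ a1 a2 a3 hqp.1
            (fun k hk1 hk2 => (hmemt k).mp (hq2 k hk1 (le_trans hk2 hqp.2)))
            (fun hmem => hq3 ((hmemt _).mpr hmem))
        rw [if_pos hn, hq, hr]; rfl
      · have hnone : (pvMerge h h rest).find? (fun p => decide (p.1 ≤ n ∧ n ≤ p.2)) = none := by
          rw [List.find?_eq_none]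
          intro p hp hpred
          have hpq : p.1 ≤ n ∧ n ≤ p.2 := of_decide_eq_true hpred
          obtain ⟨-, hq2, -, -⟩ := hP1 p hp
          exact hn ((hmemt n).mp (hq2 n hpq.1 hpq.2))
        rw [if_neg hn, hnone]; rfl
    rw [hLeft, hRight]
    cases hL : (pvMerge h h rest).find? (fun p => decide (p.1 ≤ 0 ∧ 0 ≤ p.2)) with
    | some q => cases hR : (pvMerge h h rest).find? (fun p => decide (p.1 ≤ n ∧ n ≤ p.2)) with
      | some q' => rfl
      | none => rfl
    | none => cases hR : (pvMerge h h rest).find? (fun p => decide (p.1 ≤ n ∧ n ≤ p.2)) with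
      | some q' => rfl
      | none =>
        have hmin : PySem.List.min? (PySem.Set.ofList K) (fun x => x) = some h := by
          obtain ⟨mn, hmn⟩ := Option.ne_none_iff_exists'.mp (fun he =>
            hSne ((PySem.List.min?_eq_none_iff (PySem.Set.ofList K) (fun x : Int => x)).mp he))
          have hmnS := PySem.List.min?_mem hmn
          have hmnle := PySem.List.min?_isMin hmn
          have hhle := PySem.List.key_head_sorted_le (PySem.Set.ofList K) (fun x : Int => x) htt
          have : mn = h :=
            le_antisymm (hmnle h ((hmemt h).mp List.mem_cons_self)) (hhle mn hmnS)
          rw [hmn, this]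
        have hmax : PySem.List.max? (PySem.Set.ofList K) (fun x => x)
            = some ((h :: rest).getLast (List.cons_ne_nil h rest)) := by
          obtain ⟨mx, hmx⟩ := Option.ne_none_iff_exists'.mp (fun he =>
            hSne ((PySem.List.max?_eq_none_iff (PySem.Set.ofList K) (fun x : Int => x)).mp he))
          have hmxS := PySem.List.max?_mem hmx
          have hmxge := PySem.List.max?_isMax hmx
          have h1 : mx ≤ (h :: rest).getLast (List.cons_ne_nil h rest) :=
            pvLeGetLast (h :: rest) (List.cons_ne_nil h rest) hpw mx ((hmemt mx).mpr hmxS)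
          have h2 : (h :: rest).getLast (List.cons_ne_nil h rest) ≤ mx :=
            hmxge _ ((hmemt _).mp (List.getLast_mem (List.cons_ne_nil h rest)))
          rw [hmx, le_antisymm h1 h2]
        have hhead : ((pvMerge h h rest).headD (h, h)).1 = h := pvMerge_head_fst h h rest (h, h)
        have hlast : ((pvMerge h h rest).getLastD (h, h)).2
            = (h :: rest).getLast (List.cons_ne_nil h rest) := by
          rw [pvMerge_getLast_snd]
          cases rest with
          | nil => simp
          | cons b m =>
            rw [List.getLast_cons (List.cons_ne_nil b m), List.getLastD_eq_getLast?,
                List.getLast?_eq_some_getLast (List.cons_ne_nil b m)]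
            rfl
        rw [hmin, hmax, hhead, hlast]

-- ===== VERDICT (by name: the statement is the Claim_ definition above) =====
theorem format_rejection_region_intervals_spec : Claim_equal_format_rejection_region_intervals := by
  intro K n _
  unfold Spec_format_rejection_region_intervals
  exact pvMain K n
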